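-- pv_equiv track=rewrite | github.com/fede0429/quant-screener | api/learning_engine.py | _limit_rows_by_recent_runs
-- ===== SOURCE A (Python) =====
-- def _limit_rows_by_recent_runs(rows: list[dict], lookback_runs: int) -> list[dict]:
--     allowed_dates = []
--     seen = set()
--     for row in rows:
--         snapshot_date = row["snapshot_date"]
--         if snapshot_date not in seen:
--             seen.add(snapshot_date)
--             allowed_dates.append(snapshot_date)
--         if len(allowed_dates) >= lookback_runs:
--             break
--     allowed = set(allowed_dates)
--     return [row for row in rows if row["snapshot_date"] in allowed]
-- ===== SOURCE B (Python) =====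
-- def _limit_rows_by_recent_runs(rows: list[dict], lookback_runs: int) -> list[dict]:
--     limit = max(lookback_runs, 1)
--     seen = set()
--     result = []
--     for row in rows:
--         d = row["snapshot_date"]
--         if d in seen:
--             result.append(row)
--         elif len(seen) < limit:
--             seen.add(d)
--             result.append(row)
--     return result
-- ===== Notes on version B (the rewrite author's own statement) =====
-- stated objective: alternative
-- what changed: Single pass that maintains the allowed-date set and emits matching rows as it goes, instead of A's two-pass collect-first-N-distinct-dates-then-filter structure; limit = max(lookback_runs,1) reflects A's break-after-append behaviour.
import Mathlib
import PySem

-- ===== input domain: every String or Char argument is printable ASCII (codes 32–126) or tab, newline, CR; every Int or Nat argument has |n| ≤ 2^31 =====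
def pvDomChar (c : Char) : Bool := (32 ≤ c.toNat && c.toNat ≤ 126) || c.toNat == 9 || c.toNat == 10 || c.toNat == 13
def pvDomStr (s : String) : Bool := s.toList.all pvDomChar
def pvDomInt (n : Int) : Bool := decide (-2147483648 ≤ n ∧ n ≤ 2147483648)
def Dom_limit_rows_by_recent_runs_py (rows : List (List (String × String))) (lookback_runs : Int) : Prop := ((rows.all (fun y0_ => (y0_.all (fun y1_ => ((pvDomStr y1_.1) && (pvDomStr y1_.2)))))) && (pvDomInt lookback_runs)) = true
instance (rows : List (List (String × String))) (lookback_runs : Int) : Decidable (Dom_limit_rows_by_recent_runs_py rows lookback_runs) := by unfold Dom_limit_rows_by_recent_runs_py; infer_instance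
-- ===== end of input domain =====

-- B is a single pass that maintains the allowed-date set and emits rows as it goes,
-- instead of A's two-pass collect-dates-then-filter; same return value on Pre_ (rows that all carry the key).

-- row["snapshot_date"] (both Pythons); total with default "" — Pre_ guarantees the key is present
def pvGetDate (row : List (String × String)) : String :=
  PySem.Dict.getD (PySem.Dict.mk row) "snapshot_date" ""

-- ===== PORT A =====
-- A's first loop: accumulate allowed_dates/seen, break when len(allowed_dates) >= lookback_runs
def pvCollect : List (List (String × String)) → Int → List String → PySem.Set String → List String
  | [], _, allowed, _ => allowed
  | row :: rest, lb, allowed, seen =>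
    let d := pvGetDate row
    let seen' := if PySem.Set.contains seen d then seen else PySem.Set.add seen d
    let allowed' := if PySem.Set.contains seen d then allowed else allowed ++ [d]
    if lb ≤ (allowed'.length : Int) then allowed'
    else pvCollect rest lb allowed' seen'

def limit_rows_by_recent_runs_py (rows : List (List (String × String))) (lookback_runs : Int) : List (List (String × String)) :=
  let allowed_dates := pvCollect rows lookback_runs [] PySem.Set.empty
  let allowed : PySem.Set String := PySem.Set.ofList allowed_dates
  rows.filter (fun row => PySem.Set.contains allowed (pvGetDate row))

-- ===== PORT B =====
-- B's single loop: append rows with an already-allowed date; admit a new date while |seen| < limit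
def pvScan : List (List (String × String)) → Int → PySem.Set String → List (List (String × String))
  | [], _, _ => []
  | row :: rest, limit, seen =>
    let d := pvGetDate row
    if PySem.Set.contains seen d then row :: pvScan rest limit seen
    else if PySem.Set.len seen < limit then row :: pvScan rest limit (PySem.Set.add seen d)
    else pvScan rest limit seen

def limit_rows_by_recent_runs_py_alt (rows : List (List (String × String))) (lookback_runs : Int) : List (List (String × String)) :=
  pvScan rows (max lookback_runs 1) PySem.Set.empty

-- ===== PRECONDITION & SPEC =====
-- Pre_ excludes exactly the rows without a "snapshot_date" key, where Python A raises KeyError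
def Pre_limit_rows_by_recent_runs_py (rows : List (List (String × String))) (lookback_runs : Int) : Prop :=
  rows.all (fun row => row.any (fun kv => kv.1 == "snapshot_date")) = true
instance (rows : List (List (String × String))) (lookback_runs : Int) : Decidable (Pre_limit_rows_by_recent_runs_py rows lookback_runs) := by unfold Pre_limit_rows_by_recent_runs_py; infer_instance
def pvWitness_limit_rows_by_recent_runs_py : (List (List (String × String))) × Int :=
  ([[("snapshot_date", "2024-01-01"), ("t", "x")], [("snapshot_date", "2024-01-02")], [("snapshot_date", "2024-01-01")]], 1)

def Spec_limit_rows_by_recent_runs_py (rows : List (List (String × String))) (lookback_runs : Int) (out : List (List (String × String))) : Prop := out = limit_rows_by_recent_runs_py_alt rows lookback_runs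
instance (rows : List (List (String × String))) (lookback_runs : Int) (out : List (List (String × String))) : Decidable (Spec_limit_rows_by_recent_runs_py rows lookback_runs out) := by unfold Spec_limit_rows_by_recent_runs_py; infer_instance

-- ===== CLAIM (what is proved, stated in full; the proofs are below) =====
def Claim_equal_limit_rows_by_recent_runs_py : Prop := ∀ (rows : List (List (String × String))) (lookback_runs : Int), Dom_limit_rows_by_recent_runs_py rows lookback_runs → Pre_limit_rows_by_recent_runs_py rows lookback_runs → Spec_limit_rows_by_recent_runs_py rows lookback_runs (limit_rows_by_recent_runs_py rows lookback_runs)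

-- ===== LEMMAS AND PROOFS =====

-- reference collector: A's loop with the seen-set replaced by membership in allowed itself
def pvSpecCollect : List String → Int → List String → List String
  | [], _, acc => acc
  | d :: ds, lb, acc =>
    let acc' := if d ∈ acc then acc else acc ++ [d]
    if lb ≤ (acc'.length : Int) then acc' else pvSpecCollect ds lb acc'

-- a seen-set extensionally equal to a list answers membership queries about the list
lemma pvContains_eq (seen : PySem.Set String) (acc : List String)
    (h : ∀ x, x ∈ seen ↔ x ∈ acc) (d : String) :
    PySem.Set.contains seen d = decide (d ∈ acc) := by
  by_cases hm : d ∈ acc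
  · simp only [hm, decide_true]
    exact (PySem.Set.contains_iff seen d).mpr ((h d).2 hm)
  · simp only [hm, decide_false]
    rw [← Bool.not_eq_true, PySem.Set.contains_iff]
    exact fun hx => hm ((h d).1 hx)

lemma pvCollect_eq_spec (rows : List (List (String × String))) (lb : Int) :
    ∀ (acc : List String) (seen : PySem.Set String), (∀ x, x ∈ seen ↔ x ∈ acc) →
    pvCollect rows lb acc seen = pvSpecCollect (rows.map pvGetDate) lb acc := by
  induction rows with
  | nil => intro acc seen _; rfl
  | cons row rest ih =>
    intro acc seen h
    simp only [pvCollect, pvSpecCollect, List.map_cons, pvContains_eq seen acc h]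
    by_cases hm : pvGetDate row ∈ acc
    · simp only [hm, decide_true, if_true]
      split
      · rfl
      · exact ih acc seen h
    · simp only [hm, decide_false, if_false, Bool.false_eq_true]
      split
      · rfl
      · refine ih (acc ++ [pvGetDate row]) (PySem.Set.add seen (pvGetDate row)) ?_
        intro x
        rw [PySem.Set.mem_add]
        simp [h x]

-- acc is a prefix of the collector's result
lemma pvSpecCollect_prefix (ds : List String) (lb : Int) (acc : List String) :
    acc <+: pvSpecCollect ds lb acc := by
  induction ds generalizing acc with
  | nil => exact List.prefix_rfl
  | cons d ds ih =>
    simp only [pvSpecCollect]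
    by_cases hm : d ∈ acc
    · simp only [hm, if_true]
      split
      · exact List.prefix_rfl
      · exact ih acc
    · simp only [hm, if_false]
      split
      · exact List.prefix_append _ _
      · exact (List.prefix_append _ _).trans (ih _)

lemma mem_pvSpecCollect {x : String} {acc : List String} (h : x ∈ acc) (ds : List String) (lb : Int) :
    x ∈ pvSpecCollect ds lb acc :=
  (pvSpecCollect_prefix ds lb acc).subset h

-- once the seen set is full, B's loop is a plain filter by membership in it
lemma pvScan_full (rows : List (List (String × String))) (k : Int) (seen : PySem.Set String)
    (S : List String) (h : ∀ x, x ∈ seen ↔ x ∈ S) (hfull : ¬ PySem.Set.len seen < k) :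
    pvScan rows k seen = rows.filter (fun r => decide (pvGetDate r ∈ S)) := by
  induction rows with
  | nil => rfl
  | cons row rest ih =>
    simp only [pvScan, List.filter_cons, pvContains_eq seen S h]
    by_cases hm : pvGetDate row ∈ S
    · simp [hm, ih]
    · simp only [hm, decide_false, if_false, Bool.false_eq_true, hfull , if_false]
      exact ih

lemma pvSet_len_eq (seen : PySem.Set String) : PySem.Set.len seen = (seen.length : Int) := rfl

-- main invariant: while acc is not full, B's loop filters by the final collected set
lemma pvScan_eq_filter (rows : List (List (String × String))) (k : Int) :
    ∀ (acc : List String) (seen : PySem.Set String),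
    (∀ x, x ∈ seen ↔ x ∈ acc) → seen.length = acc.length → (acc.length : Int) < k →
    pvScan rows k seen =
      rows.filter (fun r => decide (pvGetDate r ∈ pvSpecCollect (rows.map pvGetDate) k acc)) := by
  induction rows with
  | nil => intro acc seen _ _ _; rfl
  | cons row rest ih =>
    intro acc seen hmem hlen hlt
    simp only [pvScan, List.map_cons, pvSpecCollect, List.filter_cons, pvContains_eq seen acc hmem]
    by_cases hm : pvGetDate row ∈ acc
    · have hcond : ¬ k ≤ (acc.length : Int) := by omega
      simp only [hm, decide_true, if_true, hcond, if_false]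
      have hd : pvGetDate row ∈ pvSpecCollect (rest.map pvGetDate) k acc := mem_pvSpecCollect hm _ _
      simp [hd, ih acc seen hmem hlen hlt]
    · have hadd : PySem.Set.add seen (pvGetDate row) = seen ++ [pvGetDate row] :=
        PySem.Set.add_of_not_mem (fun hx => hm ((hmem _).1 hx))
      have hlen' : PySem.Set.len seen < k := by rw [pvSet_len_eq, hlen]; exact hlt
      have hmem' : ∀ x, x ∈ PySem.Set.add seen (pvGetDate row) ↔ x ∈ acc ++ [pvGetDate row] := by
        intro x; rw [PySem.Set.mem_add]; simp [hmem x]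
      have hlenadd : (PySem.Set.add seen (pvGetDate row)).length = (acc ++ [pvGetDate row]).length := by
        rw [hadd]; simp [hlen]
      simp only [hm, decide_false, if_false, Bool.false_eq_true, hlen', if_true]
      by_cases hstop : k ≤ ((acc ++ [pvGetDate row]).length : Int)
      · -- the set just became full: the tail is a plain filter by acc ++ [d]
        simp only [hstop, if_true]
        have hd : pvGetDate row ∈ acc ++ [pvGetDate row] := by simp
        have hfull : ¬ PySem.Set.len (PySem.Set.add seen (pvGetDate row)) < k := by
          rw [pvSet_len_eq, hlenadd]; omega
        simp [hd, pvScan_full rest k _ _ hmem' hfull]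
      · simp only [hstop, if_false]
        have hd : pvGetDate row ∈ pvSpecCollect (rest.map pvGetDate) k (acc ++ [pvGetDate row]) :=
          mem_pvSpecCollect (by simp) _ _
        have hlt' : ((acc ++ [pvGetDate row]).length : Int) < k := by
          push_cast at hstop ⊢; omega
        simp [hd, ih _ _ hmem' hlenadd hlt']

-- the initial step of the collector does not distinguish lb from max lb 1
lemma pvSpecCollect_max (ds : List String) (lb : Int) :
    pvSpecCollect ds lb [] = pvSpecCollect ds (max lb 1) [] := by
  cases ds with
  | nil => rfl
  | cons d ds =>
    simp only [pvSpecCollect, List.not_mem_nil, if_false, List.nil_append]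
    by_cases h1 : lb ≤ 1
    · have h2 : max lb 1 = 1 := by omega
      simp only [h2, List.length_cons, List.length_nil]
      simp [h1]
    · have hmax : max lb 1 = lb := by omega
      simp only [hmax]

-- ===== VERDICT (by name: the statement is the Claim_ definition above) =====
theorem limit_rows_by_recent_runs_py_spec : Claim_equal_limit_rows_by_recent_runs_py := by
  intro rows lb _ _
  unfold Spec_limit_rows_by_recent_runs_py limit_rows_by_recent_runs_py limit_rows_by_recent_runs_py_alt
  have hA : pvCollect rows lb [] PySem.Set.empty = pvSpecCollect (rows.map pvGetDate) lb [] :=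
    pvCollect_eq_spec rows lb [] PySem.Set.empty (by intro x; simp [PySem.Set.empty])
  have hB : pvScan rows (max lb 1) PySem.Set.empty =
      rows.filter (fun r => decide (pvGetDate r ∈ pvSpecCollect (rows.map pvGetDate) (max lb 1) [])) :=
    pvScan_eq_filter rows (max lb 1) [] PySem.Set.empty
      (by intro x; simp [PySem.Set.empty]) rfl
      (by simp only [List.length_nil, Nat.cast_zero]; omega)
  rw [hA, hB, pvSpecCollect_max]
  apply List.filter_congr
  intro r _
  exact pvContains_eq _ _ (fun x => PySem.Set.mem_ofList _ x) (pvGetDate r)
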